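-- pv_equiv track=rewrite | github.com/gb-archive/240p-test-mini-2 | gameboy/tools/huffexperiment.py | CH_assign_bitstrings
-- ===== SOURCE A (Python) =====
-- def CH_assign_bitstrings(codes_per_length):
--     """Assign consecutive bit strings for each length."""
--     bitstrings = []
--     ending_code = 0
--     for lminus1, ncodesofthislength in enumerate(codes_per_length):
--         starting_code = ending_code << 1
--         ending_code = starting_code + ncodesofthislength
--         bitstrings.extend(range(starting_code, ending_code))
--     return bitstrings
-- ===== SOURCE B (Python) =====
-- def CH_assign_bitstrings(codes_per_length):
--     """Assign consecutive bit strings for each length."""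
--     # Closed form: the first code of length i+1 is the weighted sum
--     # sum_{j<i} count[j] * 2**(i-j); no running accumulator is carried
--     # between lengths -- each starting code is recomputed from scratch.
--     result = []
--     for i, ci in enumerate(codes_per_length):
--         start = 0
--         for j, cj in enumerate(codes_per_length[:i]):
--             start += cj << (i - j)
--         result.extend(range(start, start + ci))
--     return result
-- ===== Notes on version B (the rewrite author's own statement) =====
-- stated objective: alternative
-- what changed: Drops A's running ending_code accumulator entirely: B computes each length's starting code independently by the closed-form weighted sum sum_{j<i} count[j]*2^(i-j) over the prefix, then emits that length's range; a direct formula per length instead of one stateful pass.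
import Mathlib
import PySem

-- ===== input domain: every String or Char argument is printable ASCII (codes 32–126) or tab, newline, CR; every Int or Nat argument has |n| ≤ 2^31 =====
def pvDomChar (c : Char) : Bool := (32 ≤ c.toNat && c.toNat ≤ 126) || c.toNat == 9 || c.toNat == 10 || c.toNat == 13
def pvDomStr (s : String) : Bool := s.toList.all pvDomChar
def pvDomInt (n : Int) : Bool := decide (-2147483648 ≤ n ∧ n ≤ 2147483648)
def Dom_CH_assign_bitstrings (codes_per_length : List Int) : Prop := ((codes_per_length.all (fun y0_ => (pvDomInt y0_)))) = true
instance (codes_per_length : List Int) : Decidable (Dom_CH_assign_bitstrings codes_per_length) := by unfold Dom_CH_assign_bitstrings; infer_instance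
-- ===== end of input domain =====

-- B drops A's running ending_code accumulator: each length's starting code is recomputed
-- from scratch as the closed-form weighted sum over the prefix (alternative decomposition, not faster).

-- ===== PORT A =====
-- A: one loop keeping (bitstrings, ending_code); each step extends by range(start, end).
def CH_assign_bitstrings (codes_per_length : List Int) : List Int :=
  (codes_per_length.foldl
    (fun (acc : List Int × Int) ncodes =>
      let starting_code := acc.2 * 2          -- ending_code << 1
      let ending_code := starting_code + ncodes
      (acc.1 ++ PySem.List.pyRange starting_code ending_code 1, ending_code))
    ([], 0)).1

-- ===== PORT B =====
-- B's inner loop: start = sum over enumerate(xs[:i]) of cj << (i - j).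
def CH_start (xs : List Int) (i : Nat) : Int :=
  (xs.take i).zipIdx.foldl (fun s p => s + p.1 * 2 ^ (i - p.2)) 0

-- B's outer loop: for i, ci in enumerate(xs): extend(range(start, start + ci)).
def CH_assign_bitstrings_alt (codes_per_length : List Int) : List Int :=
  codes_per_length.zipIdx.foldl
    (fun acc p =>
      let start := CH_start codes_per_length p.2
      acc ++ PySem.List.pyRange start (start + p.1) 1)
    []

-- ===== PRECONDITION & SPEC =====
def Spec_CH_assign_bitstrings (codes_per_length : List Int) (out : List Int) : Prop := out = CH_assign_bitstrings_alt codes_per_length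
instance (codes_per_length : List Int) (out : List Int) : Decidable (Spec_CH_assign_bitstrings codes_per_length out) := by unfold Spec_CH_assign_bitstrings; infer_instance

-- ===== CLAIM (what is proved, stated in full; the proofs are below) =====
def Claim_equal_CH_assign_bitstrings : Prop := ∀ (codes_per_length : List Int), Dom_CH_assign_bitstrings codes_per_length → Spec_CH_assign_bitstrings codes_per_length (CH_assign_bitstrings codes_per_length)

-- ===== LEMMAS AND PROOFS =====

-- A's ending_code after consuming a prefix.
def CH_endCode (p : List Int) : Int := p.foldl (fun e c => 2 * e + c) 0

theorem CH_endCode_append (p : List Int) (c : Int) :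
    CH_endCode (p ++ [c]) = 2 * CH_endCode p + c := by
  simp [CH_endCode, List.foldl_append]

-- the weighted-sum fold, with an explicit exponent base
def CH_g (p : List Int) (i : Nat) : Int :=
  p.zipIdx.foldl (fun s q => s + q.1 * 2 ^ (i - q.2)) 0

theorem CH_g_foldl (p : List Int) (i : Nat) : ∀ (k : Nat) (s : Int),
    (p.zipIdx k).foldl (fun s q => s + q.1 * 2 ^ (i - q.2)) s
      = s + (p.zipIdx k).foldl (fun s q => s + q.1 * 2 ^ (i - q.2)) 0 := by
  induction p with
  | nil => intro k s; simp
  | cons c rest ih =>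
      intro k s
      simp only [List.zipIdx_cons, List.foldl_cons]
      rw [ih, ih (k + 1) (0 + c * 2 ^ (i - k))]
      ring

theorem CH_g_append (p : List Int) (c : Int) (i : Nat) :
    CH_g (p ++ [c]) i = CH_g p i + c * 2 ^ (i - p.length) := by
  unfold CH_g
  rw [List.zipIdx_append, List.foldl_append]
  simp only [List.zipIdx_cons, List.zipIdx_nil, List.foldl_cons, List.foldl_nil]
  rw [CH_g_foldl p i 0 0, CH_g_foldl]
  simp [add_comm]

theorem CH_g_succ (p : List Int) (i : Nat) (h : p.length ≤ i) :
    CH_g p (i + 1) = 2 * CH_g p i := by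
  induction p using List.reverseRecOn with
  | nil => simp [CH_g]
  | append_singleton q c ih =>
      have hq : q.length ≤ i := by simp at h; omega
      rw [CH_g_append, CH_g_append, ih hq]
      have he : i + 1 - q.length = (i - q.length) + 1 := by omega
      rw [he, pow_succ]
      ring

theorem CH_start_eq_g (xs : List Int) (i : Nat) :
    CH_start xs i = CH_g (xs.take i) i := rfl

theorem CH_start_endCode (xs : List Int) : ∀ (i : Nat), i ≤ xs.length →
    CH_start xs i = 2 * CH_endCode (xs.take i) := by
  intro i
  induction i with
  | zero => intro _; simp [CH_start, CH_endCode]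
  | succ k ih =>
      intro h
      have hk : k < xs.length := by omega
      have hget : xs[k]?.toList = [xs[k]] := by simp [List.getElem?_eq_getElem hk]
      have hlen : (xs.take k).length = k := by simp; omega
      rw [CH_start_eq_g, List.take_add_one, hget, CH_g_append, hlen,
          CH_g_succ (xs.take k) k (by rw [hlen]), ← CH_start_eq_g, ih (le_of_lt hk),
          CH_endCode_append]
      have e1 : k + 1 - k = 1 := by omega
      rw [e1, pow_one]
      ring

-- A's output generated from a running ending code.
def CH_Aout : List Int → Int → List Int
  | [], _ => []
  | c :: rest, e =>
      PySem.List.pyRange (e * 2) (e * 2 + c) 1 ++ CH_Aout rest (e * 2 + c)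

theorem CH_A_fold (xs : List Int) : ∀ (acc : List Int) (e : Int),
    (xs.foldl
      (fun (a : List Int × Int) ncodes =>
        let starting_code := a.2 * 2
        let ending_code := starting_code + ncodes
        (a.1 ++ PySem.List.pyRange starting_code ending_code 1, ending_code))
      (acc, e)).1 = acc ++ CH_Aout xs e := by
  induction xs with
  | nil => intro acc e; simp [CH_Aout]
  | cons c rest ih =>
      intro acc e
      simp only [List.foldl_cons, CH_Aout]
      rw [ih]
      simp [List.append_assoc]

-- B's output from position k on.
def CH_Bout (xs : List Int) : List Int → Nat → List Int
  | [], _ => []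
  | c :: rest, k =>
      PySem.List.pyRange (CH_start xs k) (CH_start xs k + c) 1 ++ CH_Bout xs rest (k + 1)

theorem CH_B_fold (xs : List Int) (suf : List Int) : ∀ (k : Nat) (acc : List Int),
    ((suf.zipIdx k).foldl
      (fun acc (p : Int × Nat) =>
        let start := CH_start xs p.2
        acc ++ PySem.List.pyRange start (start + p.1) 1)
      acc) = acc ++ CH_Bout xs suf k := by
  induction suf with
  | nil => intro k acc; simp [CH_Bout]
  | cons c rest ih =>
      intro k acc
      simp only [List.zipIdx_cons, List.foldl_cons, CH_Bout]
      rw [ih]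
      simp [List.append_assoc]

theorem CH_Aout_eq_Bout (xs : List Int) : ∀ (suf : List Int) (k : Nat),
    xs.drop k = suf →
    CH_Aout suf (CH_endCode (xs.take k)) = CH_Bout xs suf k := by
  intro suf
  induction suf with
  | nil => intro k _; simp [CH_Aout, CH_Bout]
  | cons c rest ih =>
      intro k hdrop
      have hk : k < xs.length := by
        by_contra hge
        simp [List.drop_eq_nil_of_le (by omega : xs.length ≤ k)] at hdrop
      have hget : xs[k]? = some c := by
        have h0 : (xs.drop k)[0]? = some c := by rw [hdrop]; rfl
        simpa [List.getElem?_drop] using h0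
      have hgetlist : xs[k]?.toList = [c] := by rw [hget]; rfl
      have h2 : xs.drop (k + 1) = rest := by
        have := congrArg (List.drop 1) hdrop
        simpa [List.drop_drop, Nat.add_comm] using this
      have hs := CH_start_endCode xs k (le_of_lt hk)
      simp only [CH_Aout, CH_Bout]
      rw [hs, show CH_endCode (xs.take k) * 2 = 2 * CH_endCode (xs.take k) from by ring]
      have he2 : 2 * CH_endCode (xs.take k) + c = CH_endCode (xs.take (k + 1)) := by
        rw [List.take_add_one, hgetlist, CH_endCode_append]
      rw [he2, ih (k + 1) h2]

-- ===== VERDICT (by name: the statement is the Claim_ definition above) =====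
theorem CH_assign_bitstrings_spec : Claim_equal_CH_assign_bitstrings := by
  intro xs _
  show CH_assign_bitstrings xs = CH_assign_bitstrings_alt xs
  unfold CH_assign_bitstrings CH_assign_bitstrings_alt
  rw [CH_A_fold, CH_B_fold]
  simp only [List.nil_append]
  have := CH_Aout_eq_Bout xs xs 0 (by simp)
  simpa [CH_endCode] using this
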